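-- pv_equiv track=rewrite | github.com/simonczeller/bachelor_thesis_code | Optimization_Problem/SDP/create_spaces.py | multi_to_single
-- ===== SOURCE A (Python) =====
-- def multi_to_single(multi_index, dimensions):
--     single_index = 0
--     for i, index in enumerate(multi_index):
--         product = 1
--         for dimension in dimensions[i+1:]:
--             product *= dimension
--         single_index += index * product
--     return single_index
-- ===== SOURCE B (Python) =====
-- def multi_to_single(multi_index, dimensions):
--     n = len(multi_index)
--     # running suffix product: start with the product of dimensions beyond
--     # the last index actually used, then sweep right-to-left (Horner-style)
--     p = 1
--     for d in dimensions[n:]: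
--         p *= d
--     s = 0
--     i = n - 1
--     while i >= 0:
--         s += multi_index[i] * p
--         if i < len(dimensions):
--             p *= dimensions[i]
--         i -= 1
--     return s
-- ===== Notes on version B (the rewrite author's own statement) =====
-- stated objective: faster
-- what changed: Replaces the per-position recomputation of the tail product (an inner loop over dimensions[i+1:] for every i) with a single right-to-left sweep that maintains a running suffix product.
import Mathlib
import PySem

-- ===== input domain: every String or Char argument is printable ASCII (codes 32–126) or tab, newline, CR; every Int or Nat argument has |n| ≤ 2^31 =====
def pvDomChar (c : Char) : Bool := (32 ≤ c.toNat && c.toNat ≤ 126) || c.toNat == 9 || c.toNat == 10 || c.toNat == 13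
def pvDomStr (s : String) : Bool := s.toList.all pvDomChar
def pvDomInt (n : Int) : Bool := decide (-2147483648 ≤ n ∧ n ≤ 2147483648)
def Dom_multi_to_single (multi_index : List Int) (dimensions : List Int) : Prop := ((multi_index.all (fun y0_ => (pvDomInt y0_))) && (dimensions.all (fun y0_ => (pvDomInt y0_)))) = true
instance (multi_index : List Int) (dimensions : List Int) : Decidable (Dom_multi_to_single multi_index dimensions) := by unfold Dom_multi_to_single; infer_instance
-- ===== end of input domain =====

-- B replaces A's inner loop over dimensions[i+1:] (quadratic) with one right-to-left
-- sweep maintaining a running suffix product (linear); return values proved equal.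

-- ===== PORT A =====
-- inner loop: product = 1; for dimension in dims: product *= dimension
def pvProd (l : List Int) : Int := l.foldl (· * ·) 1

-- outer loop: for i, index in enumerate(multi_index): single_index += index * product(dimensions[i+1:])
def pvGoA (dims : List Int) : List Int → Nat → Int → Int
  | [], _, s => s
  | x :: xs, i, s =>
      pvGoA dims xs (i + 1) (s + x * pvProd (PySem.List.slice dims (some ((i : Int) + 1)) none))

def multi_to_single (multi_index : List Int) (dimensions : List Int) : Int :=
  pvGoA dimensions multi_index 0 0

-- ===== PORT B =====
-- while i >= 0: s += multi_index[i]*p; if i < len(dimensions): p *= dimensions[i]; i -= 1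
-- (fuel k is i+1; the loop counts i down from n-1 to 0)
def pvGoB (mi dims : List Int) : Nat → Int × Int → Int × Int
  | 0, st => st
  | k + 1, (s, p) =>
      let s' := s + mi.getD k 0 * p
      let p' := if k < dims.length then p * dims.getD k 0 else p
      pvGoB mi dims k (s', p')

def multi_to_single_alt (multi_index : List Int) (dimensions : List Int) : Int :=
  let n := multi_index.length
  let p := (PySem.List.slice dimensions (some (n : Int)) none).foldl (· * ·) 1
  (pvGoB multi_index dimensions n (0, p)).1

-- ===== PRECONDITION & SPEC =====
def Spec_multi_to_single (multi_index : List Int) (dimensions : List Int) (out : Int) : Prop := out = multi_to_single_alt multi_index dimensions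
instance (multi_index : List Int) (dimensions : List Int) (out : Int) : Decidable (Spec_multi_to_single multi_index dimensions out) := by unfold Spec_multi_to_single; infer_instance

-- ===== CLAIM (what is proved, stated in full; the proofs are below) =====
def Claim_equal_multi_to_single : Prop := ∀ (multi_index : List Int) (dimensions : List Int), Dom_multi_to_single multi_index dimensions → Spec_multi_to_single multi_index dimensions (multi_to_single multi_index dimensions)

-- ===== LEMMAS AND PROOFS =====

-- reference sum: Fsum mi ds = Σ_i mi[i] * prod(ds[i+1:])
def Fsum : List Int → List Int → Int
  | [], _ => 0
  | x :: xs, ds => x * pvProd (ds.drop 1) + Fsum xs (ds.drop 1)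

theorem pvProd_eq (l : List Int) : pvProd l = l.prod := by
  simp [pvProd, List.prod_eq_foldl]

theorem pvGoA_eq (dims : List Int) :
    ∀ (xs : List Int) (i : Nat) (s : Int), pvGoA dims xs i s = s + Fsum xs (dims.drop i) := by
  intro xs
  induction xs with
  | nil => intro i s; simp [pvGoA, Fsum]
  | cons x xs ih =>
      intro i s
      have hs : PySem.List.slice dims (some ((i : Int) + 1)) none = dims.drop (i + 1) := by
        have := PySem.List.slice_from_natCast (a := i + 1) (xs := dims)
        push_cast at this ⊢
        exact this
      simp only [pvGoA, Fsum, ih, hs]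
      rw [show (dims.drop i).drop 1 = dims.drop (i + 1) by
        rw [List.drop_drop, Nat.add_comm]]
      ring

theorem Fsum_snoc (l : List Int) (x : Int) :
    ∀ ds : List Int, Fsum (l ++ [x]) ds = Fsum l ds + x * pvProd (ds.drop (l.length + 1)) := by
  induction l with
  | nil => intro ds; simp [Fsum]
  | cons y l ih =>
      intro ds
      simp only [List.cons_append, Fsum, ih, List.drop_drop, List.length_cons]
      ring_nf

theorem pvGoB_eq (mi dims : List Int) :
    ∀ (k : Nat), k ≤ mi.length → ∀ s : Int,
      (pvGoB mi dims k (s, pvProd (dims.drop k))).1 = s + Fsum (mi.take k) dims := by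
  intro k
  induction k with
  | zero => intro _ s; simp [pvGoB, Fsum]
  | succ k ih =>
      intro hk s
      have hk' : k < mi.length := by omega
      have hp : (if k < dims.length then pvProd (dims.drop (k + 1)) * dims.getD k 0 else pvProd (dims.drop (k + 1))) = pvProd (dims.drop k) := by
        split_ifs with h
        · have : dims.drop k = dims[k] :: dims.drop (k + 1) := by
            rw [List.drop_eq_getElem_cons h]
          rw [this]
          simp only [pvProd_eq, List.prod_cons, List.getD, List.getElem?_eq_getElem h, Option.getD_some]
          ring
        · have h1 : dims.drop (k + 1) = [] := List.drop_eq_nil_of_le (by omega)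
          have h2 : dims.drop k = [] := List.drop_eq_nil_of_le (by omega)
          rw [h1, h2]
      have step : pvGoB mi dims (k + 1) (s, pvProd (dims.drop (k + 1)))
          = pvGoB mi dims k (s + mi.getD k 0 * pvProd (dims.drop (k + 1)), pvProd (dims.drop k)) := by
        simp only [pvGoB]
        rw [hp]
      rw [step, ih (by omega)]
      have htake : mi.take (k + 1) = mi.take k ++ [mi[k]] := by
        rw [List.take_add_one]
        simp [List.getElem?_eq_getElem hk']
      rw [htake, Fsum_snoc]
      rw [List.getD_eq_getElem _ _ hk']
      simp [List.length_take, Nat.min_eq_left (le_of_lt hk')]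
      ring

theorem multi_to_single_eq_Fsum (mi dims : List Int) : multi_to_single mi dims = Fsum mi dims := by
  simp [multi_to_single, pvGoA_eq]

theorem multi_to_single_alt_eq_Fsum (mi dims : List Int) : multi_to_single_alt mi dims = Fsum mi dims := by
  unfold multi_to_single_alt
  simp only [PySem.List.slice_from_natCast]
  have := pvGoB_eq mi dims mi.length (le_refl _) 0
  simp only [List.take_length] at this
  simpa [pvProd] using this

-- ===== VERDICT (by name: the statement is the Claim_ definition above) =====
theorem multi_to_single_spec : Claim_equal_multi_to_single := by
  intro mi dims _
  unfold Spec_multi_to_single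
  rw [multi_to_single_eq_Fsum, multi_to_single_alt_eq_Fsum]
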